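-- pv_equiv track=rewrite | github.com/rmhanchate/vlsi-design-automation | floorplanning.py | balloting_prop
-- ===== SOURCE A (Python) =====
-- def balloting_prop(polish_exp,swap_loc):
--
--     operator = ['H','V']
--     alp_count = 0
--     num_count = 0
--     i = 0
--     flag = 0
--
--     while(i < len(polish_exp)):
--         if polish_exp[i] in operator:
--             alp_count = alp_count + 1
--         else:
--             num_count = num_count + 1
--
--         if (alp_count < num_count):
--             i = i+1
--         else:
--             flag = 1
--
--             return 1
--
--     if (flag == 1):
--
--         return 1
--
--     return 0
-- ===== SOURCE B (Python) =====
-- def balloting_prop(polish_exp, swap_loc):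
--     # Divide and conquer: for a nonempty segment compute (total, m) where
--     # total = (#operands - #operators) over the segment and m = the minimum
--     # over all nonempty prefixes of the segment of that difference.
--     # Combine: total = tl + tr, m = min(ml, tl + mr).
--     # The balloting property is violated iff the global minimum prefix
--     # difference is <= 0 (operators ever catch up with operands).
--     def seg(lo, hi):
--         if hi - lo == 1:
--             d = -1 if polish_exp[lo] in ('H', 'V') else 1
--             return (d, d)
--         mid = (lo + hi) // 2
--         tl, ml = seg(lo, mid)
--         tr, mr = seg(mid, hi)
--         return (tl + tr, min(ml, tl + mr))
--     if not polish_exp: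
--         return 0
--     _, m = seg(0, len(polish_exp))
--     return 1 if m <= 0 else 0
-- ===== Notes on version B (the rewrite author's own statement) =====
-- stated objective: alternative
-- what changed: Replaced A's stateful left-to-right counting loop with early return by a divide-and-conquer segment computation: each half returns (total delta, minimum prefix delta), halves are combined as (tl+tr, min(ml, tl+mr)), and the result is 1 iff the global minimum prefix delta is <= 0.
import Mathlib
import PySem

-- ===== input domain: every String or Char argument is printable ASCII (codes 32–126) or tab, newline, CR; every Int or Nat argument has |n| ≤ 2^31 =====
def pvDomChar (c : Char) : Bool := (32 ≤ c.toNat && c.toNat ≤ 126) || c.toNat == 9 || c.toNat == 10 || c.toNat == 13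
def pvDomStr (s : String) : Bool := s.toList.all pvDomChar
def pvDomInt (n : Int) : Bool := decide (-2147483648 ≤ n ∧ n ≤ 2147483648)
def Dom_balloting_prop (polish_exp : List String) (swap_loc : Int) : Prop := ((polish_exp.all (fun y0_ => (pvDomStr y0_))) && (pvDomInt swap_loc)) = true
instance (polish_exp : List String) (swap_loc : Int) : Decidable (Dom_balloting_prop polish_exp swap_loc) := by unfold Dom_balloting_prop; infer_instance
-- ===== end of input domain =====

-- B replaces A's stateful counting loop by a divide-and-conquer (total, min-prefix-delta) segment combine; alternative decomposition, same cost.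

-- ===== PORT A =====
-- A's while-loop over index i with counters alp_count/num_count; returns 1 as soon as alp_count ≥ num_count after a step.
def ballotingLoopA : List String → Int → Int → Int
  | [], _, _ => 0
  | s :: rest, alp, num =>
    let alp' := if s = "H" ∨ s = "V" then alp + 1 else alp
    let num' := if s = "H" ∨ s = "V" then num else num + 1
    if alp' < num' then ballotingLoopA rest alp' num' else 1

def balloting_prop (polish_exp : List String) (swap_loc : Int) : Int :=
  ballotingLoopA polish_exp 0 0

-- ===== PORT B =====
-- Source B's seg(lo, hi) over index halves, transcribed as recursion on the segment
-- (take/drop at the midpoint): returns (total delta, minimum nonempty-prefix delta).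
def segB : List String → Int × Int
  | [] => (0, 0)   -- unreachable: Source B's seg is only called on nonempty segments
  | [s] =>
    let d : Int := if s = "H" ∨ s = "V" then -1 else 1
    (d, d)
  | x :: y :: ys =>
    let p := segB ((x :: y :: ys).take ((x :: y :: ys).length / 2))
    let q := segB ((x :: y :: ys).drop ((x :: y :: ys).length / 2))
    (p.1 + q.1, min p.2 (p.1 + q.2))
termination_by l => l.length
decreasing_by
  · simp only [List.length_take, List.length_cons]; omega
  · simp only [List.length_drop, List.length_cons]; omega

def balloting_prop_alt (polish_exp : List String) (swap_loc : Int) : Int :=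
  if polish_exp = [] then 0
  else if (segB polish_exp).2 ≤ 0 then 1 else 0

-- ===== PRECONDITION & SPEC =====
def Spec_balloting_prop (polish_exp : List String) (swap_loc : Int) (out : Int) : Prop := out = balloting_prop_alt polish_exp swap_loc
instance (polish_exp : List String) (swap_loc : Int) (out : Int) : Decidable (Spec_balloting_prop polish_exp swap_loc out) := by unfold Spec_balloting_prop; infer_instance

-- ===== CLAIM (what is proved, stated in full; the proofs are below) =====
def Claim_equal_balloting_prop : Prop := ∀ (polish_exp : List String) (swap_loc : Int), Dom_balloting_prop polish_exp swap_loc → Spec_balloting_prop polish_exp swap_loc (balloting_prop polish_exp swap_loc)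

-- ===== LEMMAS AND PROOFS =====

-- per-token delta: +1 for an operand, -1 for an operator
def pvDelta (s : String) : Int := if s = "H" ∨ s = "V" then -1 else 1

-- running prefix sums of ds starting from total t
def sumsFrom : List Int → Int → List Int
  | [], _ => []
  | d :: ds, t => (t + d) :: sumsFrom ds (t + d)

-- minimum of a nonempty list (0 on [])
def minOf : List Int → Int
  | [] => 0
  | [x] => x
  | x :: y :: ys => min x (minOf (y :: ys))

theorem sumsFrom_ne_nil (ds : List Int) (t : Int) (h : ds ≠ []) : sumsFrom ds t ≠ [] := by
  cases ds with
  | nil => exact absurd rfl h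
  | cons d ds => simp [sumsFrom]

theorem sumsFrom_append (a b : List Int) (t : Int) :
    sumsFrom (a ++ b) t = sumsFrom a t ++ sumsFrom b (t + a.sum) := by
  induction a generalizing t with
  | nil => simp [sumsFrom]
  | cons d ds ih => simp [sumsFrom, ih, add_assoc]

theorem sumsFrom_shift (ds : List Int) (a t : Int) :
    sumsFrom ds (a + t) = (sumsFrom ds t).map (a + ·) := by
  induction ds generalizing t with
  | nil => simp [sumsFrom]
  | cons d ds ih => simp [sumsFrom, ← ih, add_assoc]

theorem minOf_map_add (l : List Int) (a : Int) (h : l ≠ []) :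
    minOf (l.map (a + ·)) = a + minOf l := by
  induction l with
  | nil => exact absurd rfl h
  | cons x xs ih =>
    cases xs with
    | nil => simp [minOf]
    | cons y ys =>
      simp only [List.map] at ih ⊢
      rw [show minOf ((a+x) :: (a+y) :: ys.map (a + ·)) = min (a+x) (minOf ((a+y) :: ys.map (a + ·))) from rfl,
          show minOf (x :: y :: ys) = min x (minOf (y :: ys)) from rfl,
          ih (by simp)]
      omega

theorem minOf_append (a b : List Int) (ha : a ≠ []) (hb : b ≠ []) :
    minOf (a ++ b) = min (minOf a) (minOf b) := by
  induction a with
  | nil => exact absurd rfl ha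
  | cons x xs ih =>
    cases xs with
    | nil =>
      cases b with
      | nil => exact absurd rfl hb
      | cons y ys => simp [minOf]
    | cons y ys =>
      calc minOf ((x :: y :: ys) ++ b) = min x (minOf ((y :: ys) ++ b)) := by cases b <;> rfl
        _ = min x (min (minOf (y :: ys)) (minOf b)) := by rw [ih (by simp)]
        _ = min (minOf (x :: y :: ys)) (minOf b) := by
              rw [show minOf (x :: y :: ys) = min x (minOf (y :: ys)) from rfl]; omega

theorem minOf_le_iff (l : List Int) (h : l ≠ []) (c : Int) :
    minOf l ≤ c ↔ ∃ x ∈ l, x ≤ c := by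
  induction l with
  | nil => exact absurd rfl h
  | cons x xs ih =>
    cases xs with
    | nil => simp [minOf]
    | cons y ys =>
      rw [show minOf (x :: y :: ys) = min x (minOf (y :: ys)) from rfl]
      constructor
      · intro hm
        by_cases hx : x ≤ c
        · exact ⟨x, by simp, hx⟩
        · have : minOf (y :: ys) ≤ c := by omega
          obtain ⟨z, hz, hzc⟩ := (ih (by simp)).1 this
          exact ⟨z, by simp [hz], hzc⟩
      · rintro ⟨z, hz, hzc⟩
        simp only [List.mem_cons] at hz
        rcases hz with rfl | hz
        · omega
        · have : minOf (y :: ys) ≤ c := (ih (by simp)).2 ⟨z, by simpa using hz, hzc⟩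
          omega

-- A's loop computes: 1 iff some prefix delta-sum is ≤ 0
theorem loopA_eq_sums (l : List String) (alp num : Int) :
    ballotingLoopA l alp num =
      (if (sumsFrom (l.map pvDelta) (num - alp)).any (fun s => decide (s ≤ 0)) then 1 else 0) := by
  induction l generalizing alp num with
  | nil => simp [ballotingLoopA, sumsFrom]
  | cons s rest ih =>
    simp only [ballotingLoopA, List.map, sumsFrom, List.any_cons, pvDelta]
    by_cases h : s = "H" ∨ s = "V"
    · simp only [if_pos h]
      by_cases h1 : alp + 1 < num
      · have e : num - alp + -1 = num - (alp + 1) := by ring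
        rw [if_pos h1, ih, e]
        have h2 : ¬ (num - (alp + 1) ≤ 0) := by omega
        simp [h2]
      · rw [if_neg h1]
        have h2 : num - alp + -1 ≤ 0 := by omega
        simp [h2]
    · simp only [if_neg h]
      by_cases h1 : alp < num + 1
      · have e : num - alp + 1 = (num + 1) - alp := by ring
        rw [if_pos h1, ih, e]
        have h2 : ¬ ((num + 1) - alp ≤ 0) := by omega
        simp [h2]
      · rw [if_neg h1]
        have h2 : num - alp + 1 ≤ 0 := by omega
        simp [h2]

-- B's divide-and-conquer computes (total delta, min prefix delta)
theorem segB_eq (l : List String) (h : l ≠ []) :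
    segB l = ((l.map pvDelta).sum, minOf (sumsFrom (l.map pvDelta) 0)) := by
  induction l using segB.induct with
  | case1 => exact absurd rfl h
  | case2 s => simp [segB, sumsFrom, minOf, pvDelta]
  | case3 x y ys ihp ihq =>
    have htn : (x :: y :: ys).take ((x :: y :: ys).length / 2) ≠ [] := by
      intro he; have := congrArg List.length he
      simp only [List.length_take, List.length_cons, List.length_nil] at this; omega
    have hdn : (x :: y :: ys).drop ((x :: y :: ys).length / 2) ≠ [] := by
      intro he; have := congrArg List.length he
      simp only [List.length_drop, List.length_cons, List.length_nil] at this; omega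
    have ihp' := ihp htn
    have ihq' := ihq hdn
    have hsplit : (x :: y :: ys).map pvDelta =
        ((x :: y :: ys).take ((x :: y :: ys).length / 2)).map pvDelta ++
        ((x :: y :: ys).drop ((x :: y :: ys).length / 2)).map pvDelta := by
      rw [← List.map_append, List.take_append_drop]
    have han : ((x :: y :: ys).take ((x :: y :: ys).length / 2)).map pvDelta ≠ [] := by simpa using htn
    have hbn : ((x :: y :: ys).drop ((x :: y :: ys).length / 2)).map pvDelta ≠ [] := by simpa using hdn
    simp only [segB, ihp', ihq']
    rw [Prod.mk.injEq]
    constructor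
    · conv_rhs => rw [hsplit]
      rw [List.sum_append]
    · conv_rhs => rw [hsplit]
      rw [sumsFrom_append, minOf_append _ _ (sumsFrom_ne_nil _ _ han) (sumsFrom_ne_nil _ _ hbn),
          show ((0:Int) + (((x :: y :: ys).take ((x :: y :: ys).length / 2)).map pvDelta).sum) =
            ((((x :: y :: ys).take ((x :: y :: ys).length / 2)).map pvDelta).sum + (0:Int)) from by ring,
          sumsFrom_shift, minOf_map_add _ _ (sumsFrom_ne_nil _ _ hbn)]

-- ===== VERDICT (by name: the statement is the Claim_ definition above) =====
theorem balloting_prop_spec : Claim_equal_balloting_prop := by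
  intro polish_exp swap_loc _
  unfold Spec_balloting_prop balloting_prop balloting_prop_alt
  cases hpe : polish_exp with
  | nil => simp [ballotingLoopA]
  | cons s rest =>
    rw [if_neg (by simp), loopA_eq_sums, segB_eq _ (by simp)]
    have hn : sumsFrom ((s :: rest).map pvDelta) 0 ≠ [] := sumsFrom_ne_nil _ _ (by simp)
    rw [show (0:Int) - 0 = 0 from by ring]
    have hiff : (((sumsFrom ((s :: rest).map pvDelta) 0).any fun v => decide (v ≤ 0)) = true) ↔
        minOf (sumsFrom ((s :: rest).map pvDelta) 0) ≤ 0 := by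
      rw [List.any_eq_true, minOf_le_iff _ hn 0]
      constructor
      · rintro ⟨z, hz, hzc⟩; exact ⟨z, hz, by simpa using hzc⟩
      · rintro ⟨z, hz, hzc⟩; exact ⟨z, hz, by simpa using hzc⟩
    show _ = if (((s :: rest).map pvDelta).sum, minOf (sumsFrom ((s :: rest).map pvDelta) 0)).2 ≤ 0 then (1 : Int) else 0
    rw [show ((((s :: rest).map pvDelta).sum, minOf (sumsFrom ((s :: rest).map pvDelta) 0)).2 : Int)
          = minOf (sumsFrom ((s :: rest).map pvDelta) 0) from rfl]
    by_cases hb : ((sumsFrom ((s :: rest).map pvDelta) 0).any fun v => decide (v ≤ 0)) = true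
    · rw [if_pos hb, if_pos (hiff.1 hb)]
    · rw [if_neg hb, if_neg (fun h => hb (hiff.2 h))]
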